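-- pv_equiv track=rewrite | github.com/forfungg/lem_in | python/srcs/colony.py | solution_len
-- ===== SOURCE A (Python) =====
-- def solution_len(paths, ants):
-- 	p_len = list()
-- 	for path in paths:
-- 		p_len.append(len(path))
-- 	while ants:
-- 		i = p_len.index(min(p_len))
-- 		p_len[i] += 1
-- 		ants -= 1
-- 	return max(p_len)
-- ===== SOURCE B (Python) =====
-- def solution_len(paths, ants):
--     lens = [len(p) for p in paths]
--     M = max(lens)
--     if ants == 0:
--         return M
--     n = len(lens)
--
--     def cost(T):
--         return sum(T - l for l in lens if l < T)
--
--     lo = min(lens)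
--     hi = M + (ants + n - 1) // n
--     while hi - lo > 1:
--         mid = (lo + hi) // 2
--         if cost(mid) >= ants:
--             hi = mid
--         else:
--             lo = mid
--     return max(M, hi)
-- ===== Notes on version B (the rewrite author's own statement) =====
-- stated objective: faster
-- what changed: A simulates ant placement one ant at a time onto the current shortest path; B binary-searches the final fill level T with sum(max(0,T-len)) >= ants and returns max(maxlen, T).
-- outside the precondition, e.g. on solution_len([], 0): A raises ValueError, B raises ValueError; on solution_len([[1]], -1): A does not finish within the time limit, B returns 1
import Mathlib
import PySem

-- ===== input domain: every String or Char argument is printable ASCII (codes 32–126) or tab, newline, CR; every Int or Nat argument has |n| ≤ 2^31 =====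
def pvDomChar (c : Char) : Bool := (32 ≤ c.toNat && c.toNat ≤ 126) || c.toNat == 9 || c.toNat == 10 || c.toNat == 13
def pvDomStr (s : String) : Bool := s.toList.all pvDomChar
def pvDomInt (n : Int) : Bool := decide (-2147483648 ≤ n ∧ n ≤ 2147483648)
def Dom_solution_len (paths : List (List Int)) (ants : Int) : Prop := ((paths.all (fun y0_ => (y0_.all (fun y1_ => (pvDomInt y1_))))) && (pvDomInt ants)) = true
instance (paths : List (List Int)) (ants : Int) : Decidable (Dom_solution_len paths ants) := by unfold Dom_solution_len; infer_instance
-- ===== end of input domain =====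

-- B replaces A's one-ant-at-a-time simulation by a binary search for the final
-- fill level (objective: faster). Return values only; neither version mutates its arguments.

-- ===== PORT A =====
-- one iteration of A's while-loop body: i = p_len.index(min(p_len)); p_len[i] += 1
def stepA (L : List Int) : List Int :=
  match PySem.List.min? L (fun y => y) with
  | none => L          -- min([]) raises ValueError; excluded by Pre_
  | some m =>
    match PySem.List.index? L m with
    | none => L        -- unreachable: the minimum is a member
    | some i => L.set i (L.getD i 0 + 1)

-- the while-loop: under Pre_ (0 ≤ ants) it runs exactly ants times
def loopA (L : List Int) : Nat → List Int
  | 0 => L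
  | n + 1 => loopA (stepA L) n

def solution_len (paths : List (List Int)) (ants : Int) : Int :=
  let p_len := paths.map (fun path => (path.length : Int))
  (PySem.List.max? (loopA p_len ants.toNat) (fun y => y)).getD 0  -- max([]) raises; excluded by Pre_

-- ===== PORT B =====
-- cost(T) = sum(T - l for l in lens if l < T)
def costB (lens : List Int) (T : Int) : Int :=
  ((lens.filter (fun l => l < T)).map (fun l => T - l)).sum

-- the `while hi - lo > 1` binary-search loop of Source B
def bsearchB (lens : List Int) (ants : Int) (lo hi : Int) : Int :=
  if h : 1 < hi - lo then
    let mid := PySem.Int.floordiv (lo + hi) 2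
    if ants ≤ costB lens mid then bsearchB lens ants lo mid
    else bsearchB lens ants mid hi
  else hi
termination_by (hi - lo).toNat
decreasing_by
  · have h1 : lo + 1 ≤ PySem.Int.floordiv (lo + hi) 2 :=
      (PySem.Int.le_floordiv_iff_mul_le (by omega)).2 (by omega)
    have h2 : PySem.Int.floordiv (lo + hi) 2 < hi :=
      (PySem.Int.floordiv_lt_iff_lt_mul (by omega)).2 (by omega)
    simp only [mid] at *; omega
  · have h1 : lo + 1 ≤ PySem.Int.floordiv (lo + hi) 2 :=
      (PySem.Int.le_floordiv_iff_mul_le (by omega)).2 (by omega)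
    have h2 : PySem.Int.floordiv (lo + hi) 2 < hi :=
      (PySem.Int.floordiv_lt_iff_lt_mul (by omega)).2 (by omega)
    simp only [mid] at *; omega

def solution_len_alt (paths : List (List Int)) (ants : Int) : Int :=
  let lens := paths.map (fun p => (p.length : Int))
  let M := (PySem.List.max? lens (fun y => y)).getD 0   -- max([]) raises; excluded by Pre_
  if ants = 0 then M
  else
    let n : Int := lens.length
    let lo := (PySem.List.min? lens (fun y => y)).getD 0
    let hi := M + PySem.Int.floordiv (ants + n - 1) n
    max M (bsearchB lens ants lo hi)

-- ===== PRECONDITION & SPEC =====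
-- Pre_ excludes paths = [] (A raises ValueError at min/max of the empty list) and
-- ants < 0 (A's while loop never terminates); A returns on every other input.
def Pre_solution_len (paths : List (List Int)) (ants : Int) : Prop :=
  paths ≠ [] ∧ 0 ≤ ants
instance (paths : List (List Int)) (ants : Int) : Decidable (Pre_solution_len paths ants) := by
  unfold Pre_solution_len; infer_instance

def pvWitness_solution_len : List (List Int) × Int := ([[1, 2], [3]], 4)

def Spec_solution_len (paths : List (List Int)) (ants : Int) (out : Int) : Prop := out = solution_len_alt paths ants
instance (paths : List (List Int)) (ants : Int) (out : Int) : Decidable (Spec_solution_len paths ants out) := by unfold Spec_solution_len; infer_instance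

-- ===== CLAIM (what is proved, stated in full; the proofs are below) =====
def Claim_equal_solution_len : Prop := ∀ (paths : List (List Int)) (ants : Int), Dom_solution_len paths ants → Pre_solution_len paths ants → Spec_solution_len paths ants (solution_len paths ants)

-- ===== LEMMAS AND PROOFS =====

-- max of a nonempty list, as both ports' max?-expression computes it
def mfold (L : List Int) : Int :=
  match L with
  | [] => 0
  | a :: t => t.foldl max a

theorem max?_getD_eq_mfold (L : List Int) (h : L ≠ []) :
    (PySem.List.max? L (fun y => y)).getD 0 = mfold L := by
  match L with
  | a :: t => rw [PySem.List.max?_id_cons]; rfl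

theorem mfold_mem (L : List Int) (h : L ≠ []) : mfold L ∈ L := by
  match L with
  | a :: t =>
    have := PySem.List.max?_mem (xs := a :: t) (key := fun y => y)
      (m := t.foldl max a) (by rw [PySem.List.max?_id_cons])
    simpa [mfold] using this

theorem mfold_isMax (L : List Int) (x : Int) (hx : x ∈ L) : x ≤ mfold L := by
  match L with
  | a :: t =>
    have := PySem.List.max?_isMax (xs := a :: t) (key := fun y => y)
      (m := t.foldl max a) (by rw [PySem.List.max?_id_cons]) x hx
    simpa [mfold] using this

theorem mfold_unique (L : List Int) (h : L ≠ []) (v : Int)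
    (hmem : v ∈ L) (hub : ∀ x ∈ L, x ≤ v) : mfold L = v :=
  le_antisymm (hub (mfold L) (mfold_mem L h)) (mfold_isMax L v hmem)

theorem costB_cons (a : Int) (t : List Int) (T : Int) :
    costB (a :: t) T = (if a < T then T - a else 0) + costB t T := by
  by_cases h : a < T <;> simp [costB, List.filter_cons, h]

theorem costB_perm {L₁ L₂ : List Int} (h : L₁.Perm L₂) (T : Int) :
    costB L₁ T = costB L₂ T :=
  ((h.filter _).map _).sum_eq

theorem costB_nonneg (L : List Int) (T : Int) : 0 ≤ costB L T := by
  induction L with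
  | nil => simp [costB]
  | cons a t ih => rw [costB_cons]; split_ifs with h <;> omega

theorem costB_eq_zero (L : List Int) (T : Int) (h : ∀ l ∈ L, T ≤ l) : costB L T = 0 := by
  induction L with
  | nil => simp [costB]
  | cons a t ih =>
    rw [costB_cons, if_neg (by have := h a (by simp); omega)]
    simp [ih (fun l hl => h l (by simp [hl]))]

theorem costB_pos (L : List Int) (T l : Int) (hl : l ∈ L) (hlt : l < T) : 1 ≤ costB L T := by
  induction L with
  | nil => simp at hl
  | cons a t ih =>
    rw [costB_cons]
    rcases List.mem_cons.1 hl with rfl | hl'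
    · have := costB_nonneg t T; rw [if_pos hlt]; omega
    · have := ih hl'; split_ifs with h <;> omega

theorem exists_lt_of_costB_pos (L : List Int) (T : Int) (h : 1 ≤ costB L T) :
    ∃ l ∈ L, l < T := by
  by_contra hc
  push_neg at hc
  rw [costB_eq_zero L T hc] at h; omega

theorem costB_lower (L : List Int) (T M : Int) (hub : ∀ l ∈ L, l ≤ M) (hT : M < T) :
    (L.length : Int) * (T - M) ≤ costB L T := by
  induction L with
  | nil => simp [costB]
  | cons a t ih =>
    rw [costB_cons, if_pos (by have := hub a (by simp); omega)]
    have h1 := ih (fun l hl => hub l (by simp [hl]))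
    have h2 : a ≤ M := hub a (by simp)
    have h3 : ((a :: t).length : Int) = (t.length : Int) + 1 := by simp
    rw [h3]; nlinarith

-- the state after one greedy step of A, up to permutation
theorem stepA_spec (L : List Int) (h : L ≠ []) :
    ∃ m rest, PySem.List.min? L (fun y => y) = some m ∧
      (stepA L).Perm ((m + 1) :: rest) ∧ L.Perm (m :: rest) := by
  obtain ⟨m, hm⟩ : ∃ m, PySem.List.min? L (fun y => y) = some m := by
    cases hmin : PySem.List.min? L (fun y => y) with
    | none => exact absurd ((PySem.List.min?_eq_none_iff _ _).1 hmin) h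
    | some m => exact ⟨m, rfl⟩
  have hmem : m ∈ L := PySem.List.min?_mem hm
  obtain ⟨i, hi⟩ : ∃ i, PySem.List.index? L m = some i := by
    cases hidx : PySem.List.index? L m with
    | none => exact absurd ((PySem.List.index?_eq_none_iff _ _).1 hidx) (by simp [hmem])
    | some i => exact ⟨i, rfl⟩
  obtain ⟨hk, hLi, -⟩ := PySem.List.getElem_of_index?_eq_some hi
  have hdecomp : L.take i ++ L[i] :: L.drop (i + 1) = L := by
    conv_rhs => rw [← List.take_append_drop i L]
    congr 1
    exact List.getElem_cons_drop hk
  refine ⟨m, L.take i ++ L.drop (i + 1), hm, ?_, ?_⟩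
  · have hstep : stepA L = L.set i (m + 1) := by
      simp only [stepA, hm, hi]
      rw [List.getD_eq_getElem?_getD, List.getElem?_eq_getElem hk]
      simp [hLi]
    rw [hstep, List.set_eq_take_append_cons_drop, if_pos hk]
    exact List.perm_middle
  · conv_lhs => rw [← hdecomp, hLi]
    exact List.perm_middle

theorem min_le_of_min? {L : List Int} {m x : Int}
    (hm : PySem.List.min? L (fun y => y) = some m) (hx : x ∈ L) : m ≤ x :=
  PySem.List.min?_isMin hm x hx

-- the central induction: after n+1 greedy steps the maximum is max(max L) r,
-- for any r bracketing the cost function at level n+1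
theorem greedy_max : ∀ (n : Nat) (L : List Int) (r : Int), L ≠ [] →
    ((n : Int) + 1) ≤ costB L r → costB L (r - 1) < (n : Int) + 1 →
    mfold (loopA L (n + 1)) = max (mfold L) r := by
  intro n
  induction n with
  | zero =>
    intro L r hL hub hlb
    obtain ⟨m, rest, hm, hperm, hLperm⟩ := stepA_spec L hL
    -- r = m + 1
    obtain ⟨l, hlmem, hlt⟩ := exists_lt_of_costB_pos L r (by omega)
    have h1 : m < r := lt_of_le_of_lt (min_le_of_min? hm hlmem) hlt
    have h2 : r ≤ m + 1 := by
      by_contra hc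
      have hmm : m ∈ L := PySem.List.min?_mem hm
      have := costB_pos L (r - 1) m hmm (by omega)
      omega
    have hr : r = m + 1 := by omega
    subst hr
    -- mfold (stepA L) = max (mfold L) (m + 1)
    have hrest_sub : ∀ x ∈ rest, x ∈ L := fun x hx => hLperm.mem_iff.2 (by simp [hx])
    have hne : stepA L ≠ [] := by
      intro hnil; rw [hnil] at hperm; exact absurd hperm.symm.length_eq (by simp)
    have hmemL : m ∈ L := PySem.List.min?_mem hm
    have hmle : m ≤ mfold L := mfold_isMax L m hmemL
    show mfold (loopA L 1) = max (mfold L) (m + 1)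
    have : mfold (stepA L) = max (mfold L) (m + 1) := by
      apply mfold_unique _ hne
      · -- membership
        rw [hperm.mem_iff]
        by_cases hcase : m + 1 ≤ mfold L
        · have hmf : mfold L ∈ L := mfold_mem L hL
          have : mfold L ∈ m :: rest := hLperm.mem_iff.1 hmf
          rcases List.mem_cons.1 this with heq | hrest
          · omega
          · simp [max_eq_left (by omega : m + 1 ≤ mfold L), hrest]
        · have : max (mfold L) (m + 1) = m + 1 := max_eq_right (by omega)
          simp [this]
      · intro x hx
        rcases List.mem_cons.1 (hperm.mem_iff.1 hx) with rfl | hrest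
        · exact le_max_right _ _
        · exact le_trans (mfold_isMax L x (hrest_sub x hrest)) (le_max_left _ _)
    simpa [loopA] using this
  | succ n ih =>
    intro L r hL hub hlb
    obtain ⟨m, rest, hm, hperm, hLperm⟩ := stepA_spec L hL
    have hmemL : m ∈ L := PySem.List.min?_mem hm
    have hrest_sub : ∀ x ∈ rest, x ∈ L := fun x hx => hLperm.mem_iff.2 (by simp [hx])
    have hne : stepA L ≠ [] := by
      intro hnil; rw [hnil] at hperm; exact absurd hperm.symm.length_eq (by simp)
    -- m < r
    obtain ⟨l, hlmem, hlt⟩ := exists_lt_of_costB_pos L r (by push_cast at hub ⊢; omega)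
    have hmr : m < r := lt_of_le_of_lt (min_le_of_min? hm hlmem) hlt
    -- cost of stepA L at T, relative to cost of L
    have hcost : ∀ T : Int, costB (stepA L) T = costB L T - (if m < T then 1 else 0) := by
      intro T
      rw [costB_perm hperm T, costB_perm hLperm T, costB_cons, costB_cons]
      split_ifs <;> omega
    have hub' : ((n : Int) + 1) ≤ costB (stepA L) r := by
      rw [hcost r, if_pos hmr]; push_cast at hub ⊢; omega
    have hlb' : costB (stepA L) (r - 1) < (n : Int) + 1 := by
      by_cases hcase : m < r - 1
      · rw [hcost (r - 1), if_pos hcase]; push_cast at hlb ⊢; omega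
      · -- all elements of stepA L are ≥ m ≥ r - 1
        have hz : costB (stepA L) (r - 1) = 0 := by
          apply costB_eq_zero
          intro l' hl'
          rcases List.mem_cons.1 (hperm.mem_iff.1 hl') with rfl | hrest
          · omega
          · have := min_le_of_min? hm (hrest_sub l' hrest); omega
        rw [hz]; positivity
    have hstep : loopA L (n + 1 + 1) = loopA (stepA L) (n + 1) := rfl
    rw [hstep, ih (stepA L) r hne hub' hlb']
    -- mfold (stepA L) = max (mfold L) (m + 1), and m + 1 ≤ r
    have hmax : mfold (stepA L) = max (mfold L) (m + 1) := by
      apply mfold_unique _ hne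
      · rw [hperm.mem_iff]
        by_cases hcase : m + 1 ≤ mfold L
        · have hmf : mfold L ∈ L := mfold_mem L hL
          rcases List.mem_cons.1 (hLperm.mem_iff.1 hmf) with heq | hrest
          · omega
          · simp [max_eq_left (by omega : m + 1 ≤ mfold L), hrest]
        · have : max (mfold L) (m + 1) = m + 1 := max_eq_right (by omega)
          simp [this]
      · intro x hx
        rcases List.mem_cons.1 (hperm.mem_iff.1 hx) with rfl | hrest
        · exact le_max_right _ _
        · exact le_trans (mfold_isMax L x (hrest_sub x hrest)) (le_max_left _ _)
    rw [hmax]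
    have : m + 1 ≤ r := by omega
    omega

-- the binary search returns a bracket point of costB at level ants
theorem bsearchB_bracket (lens : List Int) (ants : Int) :
    ∀ lo hi : Int, lo < hi → costB lens lo < ants → ants ≤ costB lens hi →
    ants ≤ costB lens (bsearchB lens ants lo hi) ∧
      costB lens (bsearchB lens ants lo hi - 1) < ants := by
  intro lo hi
  induction lo, hi using bsearchB.induct lens ants with
  | case1 lo hi h mid hcm ih =>
    intro hlt hlo hhi
    have h1 : lo + 1 ≤ mid := (PySem.Int.le_floordiv_iff_mul_le (by omega)).2 (by omega)
    have h2 : mid < hi := (PySem.Int.floordiv_lt_iff_lt_mul (by omega)).2 (by omega)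
    rw [bsearchB, dif_pos h, if_pos hcm]
    exact ih (by omega) hlo hcm
  | case2 lo hi h mid hcm ih =>
    intro hlt hlo hhi
    have h1 : lo + 1 ≤ mid := (PySem.Int.le_floordiv_iff_mul_le (by omega)).2 (by omega)
    have h2 : mid < hi := (PySem.Int.floordiv_lt_iff_lt_mul (by omega)).2 (by omega)
    rw [bsearchB, dif_pos h, if_neg hcm]
    exact ih (by omega) (by omega) hhi
  | case3 lo hi h =>
    intro hlt hlo hhi
    rw [bsearchB, dif_neg h]
    have : hi - 1 = lo := by omega
    rw [this]
    exact ⟨hhi, hlo⟩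

theorem loopA_ne_nil (n : Nat) (L : List Int) (h : L ≠ []) : loopA L n ≠ [] := by
  induction n generalizing L with
  | zero => exact h
  | succ n ih =>
    apply ih
    intro hnil
    obtain ⟨m, rest, _, hperm, _⟩ := stepA_spec L h
    rw [hnil] at hperm
    exact absurd hperm.symm.length_eq (by simp)

-- ===== VERDICT (by name: the statement is the Claim_ definition above) =====
theorem solution_len_spec : Claim_equal_solution_len := by
  intro paths ants _ hpre
  obtain ⟨hpaths, hants⟩ := hpre
  unfold Spec_solution_len solution_len solution_len_alt
  set lens := paths.map (fun p => (p.length : Int)) with hlens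
  have hLne : lens ≠ [] := by simp [hlens, hpaths]
  by_cases h0 : ants = 0
  · subst h0; simp [loopA]
  · rw [if_neg h0]
    -- ants ≥ 1
    have hants1 : 1 ≤ ants := by omega
    obtain ⟨k, hk⟩ : ∃ k : Nat, ants = (k : Int) + 1 := ⟨ants.toNat - 1, by omega⟩
    set M := (PySem.List.max? lens (fun y => y)).getD 0 with hM
    set n : Int := (lens.length : Int) with hn
    set lo := (PySem.List.min? lens (fun y => y)).getD 0 with hlo
    set q := PySem.Int.floordiv (ants + n - 1) n with hq
    have hMval : M = mfold lens := max?_getD_eq_mfold lens hLne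
    have hnpos : 0 < n := by
      rw [hn]; simp only [Int.natCast_pos, List.length_pos_iff]; exact hLne
    obtain ⟨mv, hmv⟩ : ∃ mv, PySem.List.min? lens (fun y => y) = some mv := by
      cases hmin : PySem.List.min? lens (fun y => y) with
      | none => exact absurd ((PySem.List.min?_eq_none_iff _ _).1 hmin) hLne
      | some m => exact ⟨m, rfl⟩
    have hloval : lo = mv := by rw [hlo, hmv]; rfl
    have hmvmem : mv ∈ lens := PySem.List.min?_mem hmv
    have hub : ∀ l ∈ lens, l ≤ M := by
      intro l hl; rw [hMval]; exact mfold_isMax lens l hl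
    -- q ≥ 1 and n * q ≥ ants
    have hq1 : 1 ≤ q := by
      rw [hq]; exact (PySem.Int.le_floordiv_iff_mul_le hnpos).2 (by omega)
    have hnq : ants ≤ n * q := by
      have hqe : q = (ants + n - 1) / n := by
        rw [hq]; exact PySem.Int.floordiv_eq_ediv_of_pos hnpos
      have hdm := Int.ediv_add_emod (ants + n - 1) n
      have hm1 := Int.emod_lt_of_pos (ants + n - 1) hnpos
      have hm2 := Int.emod_nonneg (ants + n - 1) (by omega)
      rw [hqe]; omega
    -- entry conditions for the binary search
    have hlolt : costB lens lo < ants := by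
      rw [costB_eq_zero lens lo (fun l hl => by
        rw [hloval]; exact min_le_of_min? hmv hl)]
      omega
    have hhige : ants ≤ costB lens (M + q) := by
      have := costB_lower lens (M + q) M hub (by omega)
      calc ants ≤ n * q := hnq
        _ = (lens.length : Int) * (M + q - M) := by rw [hn]; ring_nf
        _ ≤ costB lens (M + q) := this
    have hlohi : lo < M + q := by
      have : lo ≤ M := by rw [hloval]; exact hub mv hmvmem
      omega
    obtain ⟨hbub, hblb⟩ := bsearchB_bracket lens ants lo (M + q) hlohi hlolt hhige
    set r := bsearchB lens ants lo (M + q) with hr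
    -- apply the greedy characterisation
    have htoNat : ants.toNat = k + 1 := by omega
    have hmain := greedy_max k lens r hLne (by rw [← hk]; exact hbub) (by rw [← hk]; exact hblb)
    rw [htoNat, max?_getD_eq_mfold _ (loopA_ne_nil (k + 1) lens hLne), hmain]
    rw [← hMval]
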